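-- pv_equiv track=rewrite | github.com/bespalovad/python-laboratory | laboratory6/task.py | findMaxAbsSumCol
-- ===== SOURCE A (Python) =====
-- def findMaxAbsSumCol (arr):
-- 	max_col = 0
-- 	max_col_ind = 0
-- 	for j in range(int(len(arr[0]))):
-- 		sum_col = 0
-- 		for i in range(int(len(arr))):
-- 			sum_col += abs(arr[i][j])
-- 		if sum_col > max_col:
-- 			max_col = sum_col
-- 			max_col_ind = j
-- 	return max_col_ind
-- ===== SOURCE B (Python) =====
-- def findMaxAbsSumCol(arr):
--     sums = [0] * len(arr[0])
--     for row in arr: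
--         sums = [s + abs(v) for s, v in zip(sums, row)]
--     best = 0
--     ind = 0
--     for j, s in enumerate(sums):
--         if s > best:
--             best = s
--             ind = j
--     return ind
-- ===== Notes on version B (the rewrite author's own statement) =====
-- stated objective: alternative
-- what changed: Replaces A's column-major nested index scan (recomputing each column sum inside the argmax loop) with a row-major single pass that accumulates a column-sum table via zip, followed by a separate argmax pass over the table.
import Mathlib
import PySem

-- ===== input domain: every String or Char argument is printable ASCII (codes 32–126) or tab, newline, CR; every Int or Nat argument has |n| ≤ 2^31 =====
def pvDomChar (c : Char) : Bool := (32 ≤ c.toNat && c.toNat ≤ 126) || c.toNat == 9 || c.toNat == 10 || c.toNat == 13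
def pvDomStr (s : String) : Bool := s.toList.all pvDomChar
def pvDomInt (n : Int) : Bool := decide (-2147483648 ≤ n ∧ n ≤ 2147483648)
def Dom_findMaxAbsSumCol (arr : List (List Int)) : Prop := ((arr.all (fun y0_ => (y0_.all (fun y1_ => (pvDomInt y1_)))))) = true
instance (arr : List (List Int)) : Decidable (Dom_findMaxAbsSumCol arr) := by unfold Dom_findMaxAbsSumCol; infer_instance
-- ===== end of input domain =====

-- B replaces A's column-major nested index scans with a row-major column-sum table (via zip) plus a separate argmax pass; same cost, different decomposition.


-- ===== PORT A =====
def findMaxAbsSumCol (arr : List (List Int)) : Int :=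
  ((PySem.List.pyRange 0 ((arr.headD []).length : Int) 1).foldl
    (fun (st : Int × Int) j =>
      if ((PySem.List.pyRange 0 (arr.length : Int) 1).foldl
            (fun sc i => sc + |PySem.List.pyGetD (PySem.List.pyGetD arr i []) j 0|) 0) > st.1
      then ((PySem.List.pyRange 0 (arr.length : Int) 1).foldl
            (fun sc i => sc + |PySem.List.pyGetD (PySem.List.pyGetD arr i []) j 0|) 0, j)
      else st)
    ((0 : Int), (0 : Int))).2

-- ===== PORT B =====
def findMaxAbsSumCol_alt (arr : List (List Int)) : Int :=
  ((PySem.List.enumerate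
      (arr.foldl (fun sums row => (sums.zip row).map (fun p => p.1 + |p.2|))
        (List.replicate (arr.headD []).length (0 : Int))) 0).foldl
     (fun (st : Int × Int) p => if p.2 > st.1 then (p.2, p.1) else st)
     ((0 : Int), (0 : Int))).2

-- ===== PRECONDITION & SPEC =====
-- Pre_ excludes exactly the inputs on which A raises IndexError: the empty list (arr[0] fails)
-- and arrays with a row shorter than the first row (arr[i][j] fails).
def Pre_findMaxAbsSumCol (arr : List (List Int)) : Prop :=
  arr ≠ [] ∧ ∀ row ∈ arr, (arr.headD []).length ≤ row.length
instance (arr : List (List Int)) : Decidable (Pre_findMaxAbsSumCol arr) := by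
  unfold Pre_findMaxAbsSumCol; infer_instance
def pvWitness_findMaxAbsSumCol : List (List Int) := [[1, -2], [3, 4]]

def Spec_findMaxAbsSumCol (arr : List (List Int)) (out : Int) : Prop := out = findMaxAbsSumCol_alt arr
instance (arr : List (List Int)) (out : Int) : Decidable (Spec_findMaxAbsSumCol arr out) := by unfold Spec_findMaxAbsSumCol; infer_instance

-- ===== CLAIM (what is proved, stated in full; the proofs are below) =====
def Claim_equal_findMaxAbsSumCol : Prop := ∀ (arr : List (List Int)), Dom_findMaxAbsSumCol arr → Pre_findMaxAbsSumCol arr → Spec_findMaxAbsSumCol arr (findMaxAbsSumCol arr)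

-- ===== LEMMAS AND PROOFS =====

-- column sum of column k over all rows
def pvColSum (arr : List (List Int)) (k : Nat) : Int :=
  arr.foldl (fun sc row => sc + |row.getD k 0|) 0

-- one zip-update step, written as a range comprehension (needs the row to be long enough)
theorem pv_zip_step (s row : List Int) (h : s.length ≤ row.length) :
    (s.zip row).map (fun p => p.1 + |p.2|)
      = (List.range s.length).map (fun k => s.getD k 0 + |row.getD k 0|) := by
  apply List.ext_getElem
  · simp [Nat.min_eq_left h]
  · intro k h1 h2
    simp at h1
    have hk : k < s.length := by omega
    simp [List.getElem_zip, List.getD_eq_getElem?_getD,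
      List.getElem?_eq_getElem hk, List.getElem?_eq_getElem (Nat.lt_of_lt_of_le hk h)]

-- the sums loop builds the column-sum table
theorem pv_sums_eq (m : Nat) (rows : List (List Int)) (hrow : ∀ row ∈ rows, m ≤ row.length)
    (init : List Int) (hlen : init.length = m) :
    rows.foldl (fun sums row => (sums.zip row).map (fun p => p.1 + |p.2|)) init
      = (List.range m).map (fun k => init.getD k 0 +
          rows.foldl (fun sc row => sc + |row.getD k 0|) 0) := by
  induction rows generalizing init with
  | nil =>
      simp only [List.foldl_nil]
      apply List.ext_getElem
      · simp [hlen]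
      · intro k h1 h2
        simp only [List.getElem_map, List.getElem_range]
        have hk : k < m := by simpa using h2
        simp [List.getD_eq_getElem?_getD, List.getElem?_eq_getElem h1]
  | cons r rs ih =>
      simp only [List.foldl_cons]
      have hr : m ≤ r.length := hrow r (by simp)
      rw [pv_zip_step init r (by omega)]
      rw [hlen]
      rw [ih (fun row hm => hrow row (by simp [hm])) _ (by simp)]
      apply List.map_congr_left
      intro k hk
      simp only [List.mem_range] at hk
      have : ((List.range m).map (fun k => init.getD k 0 + |r.getD k 0|)).getD k 0
          = init.getD k 0 + |r.getD k 0| := by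
        rw [List.getD_eq_getElem?_getD]
        rw [List.getElem?_map]
        simp [List.getElem?_range hk]
      rw [this]
      have hfold : ∀ (l : List (List Int)) (a b : Int),
          l.foldl (fun sc row => sc + |row.getD k 0|) (a + b)
            = a + l.foldl (fun sc row => sc + |row.getD k 0|) b := by
        intro l
        induction l with
        | nil => intro a b; simp
        | cons x xs ihx => intro a b; simp only [List.foldl_cons]; rw [add_assoc, ihx]
      rw [show ((0 : Int) + |r.getD k 0|) = |r.getD k 0| + 0 by ring, hfold]
      ring

-- A's inner loop equals the column sum
theorem pv_inner_eq (arr : List (List Int)) (j : Int) (hj : 0 ≤ j) :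
    (PySem.List.pyRange 0 (arr.length : Int) 1).foldl
        (fun sc i => sc + |PySem.List.pyGetD (PySem.List.pyGetD arr i []) j 0|) 0
      = pvColSum arr j.toNat := by
  rw [PySem.List.foldl_pyRange_zero_pyGetD' arr ([] : List Int)
       (fun sc row => sc + |PySem.List.pyGetD row j 0|) 0]
  unfold pvColSum
  apply PySem.List.foldl_congr_mem
  intro acc row _
  have : PySem.List.pyGetD row j 0 = row.getD j.toNat 0 := by
    obtain ⟨n, rfl⟩ := Int.eq_ofNat_of_zero_le hj
    simp
  rw [this]

-- ===== VERDICT (by name: the statement is the Claim_ definition above) =====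
theorem findMaxAbsSumCol_spec : Claim_equal_findMaxAbsSumCol := by
  intro arr _ hpre
  unfold Spec_findMaxAbsSumCol findMaxAbsSumCol findMaxAbsSumCol_alt
  obtain ⟨hne, hrows⟩ := hpre
  set m := (arr.headD []).length with hm
  set sums := arr.foldl (fun sums row => (sums.zip row).map (fun p => p.1 + |p.2|))
                (List.replicate m (0 : Int)) with hsums
  have hsums_eq : sums = (List.range m).map (fun k => pvColSum arr k) := by
    rw [hsums, pv_sums_eq m arr hrows _ (by simp)]
    apply List.map_congr_left
    intro k hk
    simp only [List.mem_range] at hk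
    unfold pvColSum
    simp
  have hlen : sums.length = m := by rw [hsums_eq]; simp
  have henum : PySem.List.enumerate sums 0
      = (PySem.List.pyRange 0 (sums.length : Int) 1).map
          (fun j => (j, PySem.List.pyGetD sums j 0)) := by
    exact PySem.List.enumerate_eq_map_pyRange sums 0
  rw [henum, List.foldl_map, hlen]
  apply congrArg
  apply PySem.List.foldl_congr_mem
  intro st j hjmem
  have hj := (PySem.List.mem_pyRange_one).mp hjmem
  have hj0 : 0 ≤ j := hj.1
  have hjm : j < (m : Int) := hj.2
  rw [pv_inner_eq arr j hj0]
  have hget : PySem.List.pyGetD sums j 0 = pvColSum arr j.toNat := by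
    obtain ⟨n, rfl⟩ := Int.eq_ofNat_of_zero_le hj0
    rw [hsums_eq]
    simp only [PySem.List.pyGetD_natCast]
    rw [List.getD_eq_getElem?_getD, List.getElem?_map]
    have hn : n < m := by exact_mod_cast hjm
    simp [List.getElem?_range hn]
  rw [hget]
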